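-- pv_equiv track=rewrite | github.com/Yy12136/eureka_in_maniskill | code_generation/eureka/run_eureka.py | normalize_reward_items
-- ===== SOURCE A (Python) =====
-- def get_reward_mapping():
--     """定义奖励项的同义词映射"""
--     return {
--         # 距离/接近相关
--         'reward_distance': ['reward_dist', 'reward_approach', 'reward_reach', 'reward_near'],
--         # 抓取相关
--         'reward_grasp': ['reward_grip', 'reward_hold', 'reward_contact'],
--         # 提升相关
--         'reward_lift': ['reward_height', 'reward_elevation', 'reward_raise', 'reward_up'],
--         # 稳定性相关
--         'reward_stability': ['reward_stable', 'reward_balance', 'reward_steady'],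
--         # 控制相关
--         'reward_control': ['reward_effort', 'reward_energy', 'reward_smooth'],
--     }
--
-- def normalize_reward_items(reward_items):
--     """标准化奖励项列表"""
--     mapping = get_reward_mapping()
--     normalized = []
--     for item in reward_items:
--         found = False
--         for standard_name, variants in mapping.items():
--             if item in variants or item == standard_name:
--                 normalized.append(standard_name)
--                 found = True
--                 break
--         if not found:
--             normalized.append(item)
--     return sorted(normalized)
-- ===== SOURCE B (Python) =====
-- def get_reward_mapping():
--     """定义奖励项的同义词映射"""
--     return {
--         'reward_distance': ['reward_dist', 'reward_approach', 'reward_reach', 'reward_near'],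
--         'reward_grasp': ['reward_grip', 'reward_hold', 'reward_contact'],
--         'reward_lift': ['reward_height', 'reward_elevation', 'reward_raise', 'reward_up'],
--         'reward_stability': ['reward_stable', 'reward_balance', 'reward_steady'],
--         'reward_control': ['reward_effort', 'reward_energy', 'reward_smooth'],
--     }
--
-- def normalize_reward_items(reward_items):
--     """标准化奖励项列表"""
--     rev = {}
--     for standard_name, variants in get_reward_mapping().items():
--         rev[standard_name] = standard_name
--         for v in variants:
--             rev[v] = standard_name
--     return sorted(rev.get(item, item) for item in reward_items)
-- ===== Notes on version B (the rewrite author's own statement) =====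
-- stated objective: idiomatic
-- what changed: B builds a reverse synonym->standard dict once and then normalizes in a single lookup pass with sorted(rev.get(item, item) ...), removing A's per-item scan over the synonym table with its found-flag/break loop.
import Mathlib
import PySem

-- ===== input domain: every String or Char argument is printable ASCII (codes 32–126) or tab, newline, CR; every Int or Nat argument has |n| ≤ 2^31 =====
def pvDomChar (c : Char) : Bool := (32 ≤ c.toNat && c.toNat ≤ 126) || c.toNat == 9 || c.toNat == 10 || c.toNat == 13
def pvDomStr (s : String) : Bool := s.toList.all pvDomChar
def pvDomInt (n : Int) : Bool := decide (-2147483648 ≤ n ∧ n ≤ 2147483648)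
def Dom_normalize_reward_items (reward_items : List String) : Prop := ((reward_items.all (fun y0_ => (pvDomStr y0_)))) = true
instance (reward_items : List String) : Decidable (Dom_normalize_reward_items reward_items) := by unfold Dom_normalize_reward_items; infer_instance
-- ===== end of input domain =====

-- B replaces A's per-item scan over the synonym table (found-flag loop with break) by a
-- reverse synonym->standard dict built once and a single lookup pass; objective: idiomatic.

-- ===== PORT A =====
-- get_reward_mapping(): the module's synonym table (a dict, as an insertion-ordered assoc list)
def pvMapping : List (String × List String) :=
  [ ("reward_distance", ["reward_dist", "reward_approach", "reward_reach", "reward_near"]),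
    ("reward_grasp", ["reward_grip", "reward_hold", "reward_contact"]),
    ("reward_lift", ["reward_height", "reward_elevation", "reward_raise", "reward_up"]),
    ("reward_stability", ["reward_stable", "reward_balance", "reward_steady"]),
    ("reward_control", ["reward_effort", "reward_energy", "reward_smooth"]) ]

-- A's inner `for standard_name, variants in mapping.items(): … break` with the found flag:
-- returns the appended name (standard_name on a hit, the item itself when not found)
def pvFindStd (item : String) : List (String × List String) → String
  | [] => item
  | (std, variants) :: rest =>
      if variants.contains item || item == std then std else pvFindStd item rest

def normalize_reward_items (reward_items : List String) : List String :=
  PySem.List.sorted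
    (reward_items.foldl (fun normalized item => normalized ++ [pvFindStd item pvMapping]) [])
    (fun x => x) false

-- ===== PORT B =====
-- rev: the reverse map, built once (standard_name -> itself, each variant -> standard_name)
def pvRev : PySem.Dict String String :=
  pvMapping.foldl
    (fun d p => p.2.foldl (fun d v => d.insert v p.1) (d.insert p.1 p.1))
    PySem.Dict.empty

def normalize_reward_items_alt (reward_items : List String) : List String :=
  PySem.List.sorted (reward_items.map (fun item => pvRev.getD item item)) (fun x => x) false

-- ===== PRECONDITION & SPEC =====
def Spec_normalize_reward_items (reward_items : List String) (out : List String) : Prop := out = normalize_reward_items_alt reward_items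
instance (reward_items : List String) (out : List String) : Decidable (Spec_normalize_reward_items reward_items out) := by unfold Spec_normalize_reward_items; infer_instance

-- ===== CLAIM (what is proved, stated in full; the proofs are below) =====
def Claim_equal_normalize_reward_items : Prop := ∀ (reward_items : List String), Dom_normalize_reward_items reward_items → Spec_normalize_reward_items reward_items (normalize_reward_items reward_items)

-- ===== LEMMAS AND PROOFS =====

-- all 25 names occurring in the synonym table
def pvAllNames : List String :=
  [ "reward_distance", "reward_dist", "reward_approach", "reward_reach", "reward_near",
    "reward_grasp", "reward_grip", "reward_hold", "reward_contact",
    "reward_lift", "reward_height", "reward_elevation", "reward_raise", "reward_up",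
    "reward_stability", "reward_stable", "reward_balance", "reward_steady",
    "reward_control", "reward_effort", "reward_energy", "reward_smooth" ]

-- pvRev, evaluated (the fold over the literal table)
lemma pvRev_eval : pvRev = PySem.Dict.mk
    [("reward_distance", "reward_distance"), ("reward_dist", "reward_distance"),
     ("reward_approach", "reward_distance"), ("reward_reach", "reward_distance"),
     ("reward_near", "reward_distance"), ("reward_grasp", "reward_grasp"),
     ("reward_grip", "reward_grasp"), ("reward_hold", "reward_grasp"),
     ("reward_contact", "reward_grasp"), ("reward_lift", "reward_lift"),
     ("reward_height", "reward_lift"), ("reward_elevation", "reward_lift"),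
     ("reward_raise", "reward_lift"), ("reward_up", "reward_lift"),
     ("reward_stability", "reward_stability"), ("reward_stable", "reward_stability"),
     ("reward_balance", "reward_stability"), ("reward_steady", "reward_stability"),
     ("reward_control", "reward_control"), ("reward_effort", "reward_control"),
     ("reward_energy", "reward_control"), ("reward_smooth", "reward_control")] := rfl

lemma pvItem_eq (s : String) : pvFindStd s pvMapping = pvRev.getD s s := by
  by_cases h : s ∈ pvAllNames
  · simp only [pvAllNames, List.mem_cons, List.not_mem_nil, or_false] at h
    rcases h with h|h|h|h|h|h|h|h|h|h|h|h|h|h|h|h|h|h|h|h|h|h <;> subst h <;> rfl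
  · simp only [pvAllNames, List.mem_cons, List.not_mem_nil, or_false, not_or] at h
    obtain ⟨h1,h2,h3,h4,h5,h6,h7,h8,h9,h10,h11,h12,h13,h14,h15,h16,h17,h18,h19,h20,h21,h22⟩ := h
    rw [pvRev_eval]
    simp [pvFindStd, pvMapping, PySem.Dict.getD,
      h1,h2,h3,h4,h5,h6,h7,h8,h9,h10,h11,h12,h13,h14,h15,h16,h17,h18,h19,h20,h21,h22,
      Ne.symm h1, Ne.symm h2, Ne.symm h3, Ne.symm h4, Ne.symm h5, Ne.symm h6, Ne.symm h7,
      Ne.symm h8, Ne.symm h9, Ne.symm h10, Ne.symm h11, Ne.symm h12, Ne.symm h13, Ne.symm h14,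
      Ne.symm h15, Ne.symm h16, Ne.symm h17, Ne.symm h18, Ne.symm h19, Ne.symm h20, Ne.symm h21,
      Ne.symm h22, PySem.Dict.get?]

-- ===== VERDICT (by name: the statement is the Claim_ definition above) =====
theorem normalize_reward_items_spec : Claim_equal_normalize_reward_items := by
  intro reward_items _
  unfold Spec_normalize_reward_items normalize_reward_items normalize_reward_items_alt
  rw [PySem.List.foldl_append_singleton_eq_map]
  exact congrArg (PySem.List.sorted · (fun x => x) false) (List.map_congr_left (fun s _ => pvItem_eq s))
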